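-- pv_equiv track=rewrite | github.com/guillaumebour/programme-ocr | src/FonctionsBasesImages.py | getNewContours
-- ===== SOURCE A (Python) =====
-- def getMinMax(contour):
-- 	"""Retourne le Xmax,Ymax et le Xmin, Ymin d'un contour"""
--
-- 	X = []
-- 	Y = []
--
-- 	for p in contour:
-- 		X.append(p[0])
-- 		Y.append(p[1])
--
-- 	return ((max(X),max(Y)),(min(X),min(Y)))
--
-- def getNewContours(contours):
-- 	"""Remplace chaque contour par 4 points (HG, HD, BG, BD)"""
-- 	nouveauContours = []
--
-- 	for c in contours:
-- 		Max, Min = getMinMax(c)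
-- 		HG = (Min[0],Min[1])
-- 		HD = (Max[0],Min[1])
-- 		BG = (Min[0],Max[1])
-- 		BD = (Max[0],Max[1])
-- 		nC = [HG,HD,BD,BG]
-- 		nouveauContours.append(nC)
--
-- 	return nouveauContours
-- ===== SOURCE B (Python) =====
-- def getNewContours(contours):
--     result = []
--     for c in contours:
--         xs = sorted(p[0] for p in c)
--         ys = sorted(p[1] for p in c)
--         result.append([(xs[0], ys[0]), (xs[-1], ys[0]),
--                        (xs[-1], ys[-1]), (xs[0], ys[-1])])
--     return result
-- ===== Notes on version B (the rewrite author's own statement) =====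
-- stated objective: alternative
-- what changed: Replaces the per-contour min/max extrema computation by sorting each contour's x- and y-coordinate lists and reading the bounding-box corners off the two endpoints (first and last element) of each sorted list.
import Mathlib
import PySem

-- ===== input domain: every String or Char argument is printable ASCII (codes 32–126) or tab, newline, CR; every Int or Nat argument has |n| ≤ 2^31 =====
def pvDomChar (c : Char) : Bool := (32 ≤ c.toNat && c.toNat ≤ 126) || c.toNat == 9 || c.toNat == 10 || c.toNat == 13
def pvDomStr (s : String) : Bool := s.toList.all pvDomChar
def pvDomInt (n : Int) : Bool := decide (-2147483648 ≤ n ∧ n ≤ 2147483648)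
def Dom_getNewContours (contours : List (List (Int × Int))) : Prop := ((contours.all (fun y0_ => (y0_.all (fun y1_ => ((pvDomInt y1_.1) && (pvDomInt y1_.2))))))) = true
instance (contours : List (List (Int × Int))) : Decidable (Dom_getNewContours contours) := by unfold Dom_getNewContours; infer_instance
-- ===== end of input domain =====

-- B replaces A's per-contour min/max extrema scan by sorting each contour's x- and
-- y-coordinate lists and reading the corners off the sorted lists' endpoints
-- (alternative algorithm; same results, no speed claim).

-- ===== PORT A =====
-- getMinMax: builds lists X, Y by appending, then ((max X, max Y), (min X, min Y));
-- max?/min? are none on an empty contour (Python ValueError), excluded by Pre_.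
def getMinMax (contour : List (Int × Int)) : (Int × Int) × (Int × Int) :=
  let X := contour.foldl (fun acc p => acc ++ [p.1]) []
  let Y := contour.foldl (fun acc p => acc ++ [p.2]) []
  (((PySem.List.max? X (fun x => x)).getD 0, (PySem.List.max? Y (fun x => x)).getD 0),
   ((PySem.List.min? X (fun x => x)).getD 0, (PySem.List.min? Y (fun x => x)).getD 0))

def getNewContours (contours : List (List (Int × Int))) : List (List (Int × Int)) :=
  contours.foldl (fun acc c =>
    let mm := getMinMax c
    let Max := mm.1
    let Min := mm.2
    let HG := (Min.1, Min.2)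
    let HD := (Max.1, Min.2)
    let BG := (Min.1, Max.2)
    let BD := (Max.1, Max.2)
    acc ++ [[HG, HD, BD, BG]]) []

-- ===== PORT B =====
-- Source B: xs = sorted x-coords, ys = sorted y-coords; corners from xs[0], xs[-1], ys[0], ys[-1].
-- pyGet? is none exactly where Python raises IndexError (empty contour, excluded by Pre_).
def getNewContours_alt (contours : List (List (Int × Int))) : List (List (Int × Int)) :=
  contours.foldl (fun acc c =>
    let xs := PySem.List.sorted (c.map Prod.fst) (fun v => v) false
    let ys := PySem.List.sorted (c.map Prod.snd) (fun v => v) false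
    match PySem.List.pyGet? xs 0, PySem.List.pyGet? xs (-1),
          PySem.List.pyGet? ys 0, PySem.List.pyGet? ys (-1) with
    | some x0, some x1, some y0, some y1 =>
        acc ++ [[(x0, y0), (x1, y0), (x1, y1), (x0, y1)]]
    | _, _, _, _ => acc ++ [[]]   -- unreachable under Pre_: Python raises IndexError here
    ) []

-- ===== PRECONDITION & SPEC =====
-- Pre_ excludes inputs containing an empty contour: there A raises ValueError
-- (max of an empty list) and B raises IndexError (xs[0]).
def Pre_getNewContours (contours : List (List (Int × Int))) : Prop :=
  (contours.all (fun c => !c.isEmpty)) = true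
instance (contours : List (List (Int × Int))) : Decidable (Pre_getNewContours contours) := by
  unfold Pre_getNewContours; infer_instance

def pvWitness_getNewContours : (List (List (Int × Int))) :=
  [[(0, 1), (3, -2), (1, 1)], [(5, 5)]]

def Spec_getNewContours (contours : List (List (Int × Int))) (out : List (List (Int × Int))) : Prop := out = getNewContours_alt contours
instance (contours : List (List (Int × Int))) (out : List (List (Int × Int))) : Decidable (Spec_getNewContours contours out) := by unfold Spec_getNewContours; infer_instance

-- ===== CLAIM (what is proved, stated in full; the proofs are below) =====
def Claim_equal_getNewContours : Prop := ∀ (contours : List (List (Int × Int))), Dom_getNewContours contours → Pre_getNewContours contours → Spec_getNewContours contours (getNewContours contours)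

-- ===== LEMMAS AND PROOFS =====

lemma flatten_map_singleton {α β : Type} (f : α → β) (l : List α) :
    (l.map (fun x => [f x])).flatten = l.map f := by
  induction l with
  | nil => rfl
  | cons q t ih => simp [ih]

lemma getMinMax_cons (p : Int × Int) (rest : List (Int × Int)) :
    getMinMax (p :: rest) =
      (((rest.map Prod.fst).foldl max p.1, (rest.map Prod.snd).foldl max p.2),
       ((rest.map Prod.fst).foldl min p.1, (rest.map Prod.snd).foldl min p.2)) := by
  simp [getMinMax, PySem.List.max?_id_cons, PySem.List.min?_id_cons, flatten_map_singleton]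

-- head of sorted(x::xs) is the running min, last element is the running max
lemma sorted_ends (x : Int) (xs : List Int) :
    PySem.List.pyGet? (PySem.List.sorted (x :: xs) (fun v => v) false) 0
      = some (xs.foldl min x) ∧
    PySem.List.pyGet? (PySem.List.sorted (x :: xs) (fun v => v) false) (-1)
      = some (xs.foldl max x) := by
  set S := PySem.List.sorted (x :: xs) (fun v => v) false with hS
  have hperm : S.Perm (x :: xs) := PySem.List.sorted_perm _ _ _
  have hne : S ≠ [] := by
    intro h; have := hperm.length_eq; simp [h] at this
  obtain ⟨m, t, hmt⟩ := List.exists_cons_of_ne_nil hne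
  constructor
  · rw [hmt, PySem.List.pyGet?_zero_cons]
    have hmem : m ∈ x :: xs := hperm.mem_iff.mp (by simp [hmt])
    have hle : ∀ y ∈ x :: xs, m ≤ y := by
      have := PySem.List.key_head_sorted_le (xs := x :: xs) (key := fun v => v) (by rw [← hS, hmt])
      simpa using this
    have hfmem : xs.foldl min x ∈ x :: xs := by
      rcases PySem.List.foldl_min_mem xs x with h | h
      · simp [h]
      · simp [h]
    have hfle := PySem.List.foldl_min_le xs x
    have h1 : m ≤ xs.foldl min x := hle _ hfmem
    have h2 : xs.foldl min x ≤ m := by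
      rcases List.mem_cons.mp hmem with h | h
      · exact h ▸ hfle.1
      · exact hfle.2 _ h
    exact congrArg some (le_antisymm h1 h2)
  · rw [PySem.List.pyGet?_neg_one]
    have hlast : S.getLast? = some (S.getLast hne) := List.getLast?_eq_some_getLast (h := hne)
    rw [hlast]
    have hlen : 0 < S.length := by rw [hmt]; simp
    have hgl : S.getLast hne = S[S.length - 1] := List.getLast_eq_getElem hne
    have hge : ∀ y ∈ x :: xs, y ≤ S.getLast hne := by
      intro y hy
      have hyS : y ∈ S := hperm.mem_iff.mpr hy
      obtain ⟨p, hp, hpy⟩ := List.mem_iff_getElem.mp hyS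
      have := PySem.List.key_sorted_getElem_mono (xs := x :: xs) (key := fun v => v)
        (p := p) (q := S.length - 1) (by omega) (by rw [← hS]; omega)
      rw [hgl]
      simpa [← hS, hpy] using this
    have hmemL : S.getLast hne ∈ x :: xs := hperm.mem_iff.mp (List.getLast_mem hne)
    have hfmax := PySem.List.le_foldl_max xs x
    have hfmem : xs.foldl max x ∈ x :: xs := by
      rcases PySem.List.foldl_max_mem xs x with h | h
      · simp [h]
      · simp [h]
    have h1 : S.getLast hne ≤ xs.foldl max x := by
      rcases List.mem_cons.mp hmemL with h | h
      · exact h ▸ hfmax.1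
      · exact hfmax.2 _ h
    have h2 : xs.foldl max x ≤ S.getLast hne := hge _ hfmem
    exact congrArg some (le_antisymm h1 h2)

lemma getElem_zero_of_pyGet? (S : List Int) (a : Int) (hlt : 0 < S.length)
    (h : PySem.List.pyGet? S 0 = some a) : S[0] = a := by
  rw [PySem.List.pyGet?_zero, List.getElem?_eq_getElem hlt] at h
  exact Option.some.inj h

-- ===== VERDICT (by name: the statement is the Claim_ definition above) =====
theorem getNewContours_spec : Claim_equal_getNewContours := by
  intro contours _ hpre
  unfold Spec_getNewContours getNewContours getNewContours_alt
  apply PySem.List.foldl_congr_mem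
  intro acc c hc
  unfold Pre_getNewContours at hpre
  rw [List.all_eq_true] at hpre
  have hne := hpre c hc
  cases c with
  | nil => simp at hne
  | cons p rest =>
    have hx := sorted_ends p.1 (rest.map Prod.fst)
    have hy := sorted_ends p.2 (rest.map Prod.snd)
    have hlx : 0 < (PySem.List.sorted (p.1 :: rest.map Prod.fst) (fun v => v) false).length := by
      rw [(PySem.List.sorted_perm _ _ _).length_eq]; simp
    have hly : 0 < (PySem.List.sorted (p.2 :: rest.map Prod.snd) (fun v => v) false).length := by
      rw [(PySem.List.sorted_perm _ _ _).length_eq]; simp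
    have hx0 := getElem_zero_of_pyGet? _ _ hlx hx.1
    have hy0 := getElem_zero_of_pyGet? _ _ hly hy.1
    simp [getMinMax_cons, hx0, hy0, hx.2, hy.2]
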